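-- pv_equiv track=rewrite | github.com/chinese-liliths-throne/GirlLifeLocalization | src/localization/sync.py | _split_qsp_expression_segments
-- ===== SOURCE A (Python) =====
-- def _split_qsp_expression_segments(text: str) -> list[tuple[bool, str]] | None:
--     if not text:
--         return []
--
--     segments: list[tuple[bool, str]] = []
--     code_start = 0
--     index = 0
--     length = len(text)
--
--     while index < length:
--         char = text[index]
--         if char not in ("'", '"'):
--             index += 1
--             continue
--
--         if code_start < index:
--             segments.append((False, text[code_start:index]))
--
--         quote = char
--         string_start = index
--         index += 1
--
--         while index < length:
--             current = text[index]
--             if current == quote: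
--                 if index + 1 < length and text[index + 1] == quote:
--                     index += 2
--                     continue
--                 index += 1
--                 segments.append((True, text[string_start:index]))
--                 code_start = index
--                 break
--             index += 1
--         else:
--             return None
--
--     if code_start < length:
--         segments.append((False, text[code_start:]))
--     return segments
-- ===== SOURCE B (Python) =====
-- import re
--
-- # One literal of either quote style; '' / "" inside are escaped quotes.
-- _QSP_LITERAL = re.compile("'(?:[^']|'')*'|\"(?:[^\"]|\"\")*\"")
--
--
-- def _split_qsp_expression_segments(text: str) -> list[tuple[bool, str]] | None:
--     # Regex-driven two-phase split: finditer yields the quoted literals,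
--     # the gaps between them become code segments; a quote character left
--     # over in any gap (or the tail) means an unterminated literal -> None.
--     segments: list[tuple[bool, str]] = []
--     pos = 0
--     for m in _QSP_LITERAL.finditer(text):
--         gap = text[pos:m.start()]
--         if "'" in gap or '"' in gap:
--             return None
--         if gap:
--             segments.append((False, gap))
--         segments.append((True, m.group()))
--         pos = m.end()
--     tail = text[pos:]
--     if "'" in tail or '"' in tail:
--         return None
--     if tail:
--         segments.append((False, tail))
--     return segments
-- ===== Notes on version B (the rewrite author's own statement) =====
-- stated objective: idiomatic
-- what changed: A walks the text one character at a time with an explicit in-string state machine; B is a regex-driven two-phase split: re.finditer with a compiled pattern for single- or double-quoted QSP literals (doubled-quote escapes included) yields the literal matches, the gaps between matches become the code segments, and a stray quote character left in a gap or the tail signals an unterminated literal (None).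
import Mathlib
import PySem

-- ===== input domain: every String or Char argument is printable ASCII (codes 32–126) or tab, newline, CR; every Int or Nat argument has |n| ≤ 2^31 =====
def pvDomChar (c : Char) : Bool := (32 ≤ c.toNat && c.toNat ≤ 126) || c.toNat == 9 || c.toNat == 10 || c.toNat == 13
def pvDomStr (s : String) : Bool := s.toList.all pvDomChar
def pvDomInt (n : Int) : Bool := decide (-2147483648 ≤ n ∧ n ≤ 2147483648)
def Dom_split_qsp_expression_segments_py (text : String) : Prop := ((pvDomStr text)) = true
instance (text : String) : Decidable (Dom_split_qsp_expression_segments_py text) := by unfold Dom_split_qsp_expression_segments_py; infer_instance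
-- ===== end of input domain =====

-- B replaces A's one-character in-string state machine by a regex-style two-phase split:
-- match the quoted literals (`'(?:[^']|'')*'|"(?:[^"]|"")*"` via finditer), emit the gaps
-- between them as code, and return None when a gap or the tail still holds a quote char.

-- Python slice text[a:b] for natural bounds 0 ≤ a ≤ b (exact there: Python clamps b to the
-- length and yields '' when b ≤ a, as drop/take do); shared by both ports.
def pvSlice (cs : List Char) (a b : Nat) : String := String.ofList ((cs.drop a).take (b - a))

-- ===== PORT A =====
-- A's inner while-loop: scan one character at a time from `index` for the closing quote,
-- skipping doubled-quote escapes; returns the position just after the closing quote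
-- (none = while-else, unterminated literal).  The `fuel` parameter is only a structural-
-- recursion guard: any fuel ≥ cs.length - index behaves like Python's unbounded while.
-- text[index] is ported as List.getD index ' ' (exact: every access is guarded by
-- index < length).
def qspInnerA (cs : List Char) (quote : Char) : Nat → Nat → Option Nat
  | 0, _ => none
  | fuel + 1, index =>
    if index < cs.length then
      let current := cs.getD index ' '
      if current = quote then
        if index + 1 < cs.length ∧ cs.getD (index + 1) ' ' = quote then
          qspInnerA cs quote fuel (index + 2)
        else
          some (index + 1)
      else
        qspInnerA cs quote fuel (index + 1)
    else
      none

-- A's outer while-loop: `index` scans for a quote character, `code_start` marks the start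
-- of the pending code gap; on a quote, emit the gap, run the inner loop, emit the literal.
def qspOuterA (cs : List Char) : Nat → List (Bool × String) → Nat → Nat →
    Option (List (Bool × String))
  | 0, _, _, _ => none
  | fuel + 1, segs, code_start, index =>
    if index < cs.length then
      let char := cs.getD index ' '
      if char ≠ '\'' ∧ char ≠ '"' then
        qspOuterA cs fuel segs code_start (index + 1)
      else
        let segs1 := if code_start < index then segs ++ [(false, pvSlice cs code_start index)] else segs
        match qspInnerA cs char cs.length (index + 1) with
        | none => none
        | some r => qspOuterA cs fuel (segs1 ++ [(true, pvSlice cs index r)]) r r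
    else
      some (if code_start < cs.length then segs ++ [(false, pvSlice cs code_start cs.length)] else segs)

def split_qsp_expression_segments_py (text : String) : Option (List (Bool × String)) :=
  if text.toList = [] then some []  -- "if not text: return []"
  else qspOuterA text.toList (text.toList.length + 1) [] 0 0

-- ===== PORT B =====
-- The regex sub-pattern `(?:[^q]|qq)*q` tried at position p, exactly as Python's re
-- backtracking evaluates it: greedily iterate the star ([^q] on a non-quote, qq on a
-- doubled quote), and on failure un-iterate the last qq pair and close the literal on
-- its first quote.  Returns the index just after the closing quote.  `fuel` is only a
-- structural-recursion guard: any fuel ≥ cs.length - p behaves like the regex engine.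
def qspMatchLitB (cs : List Char) (q : Char) : Nat → Nat → Option Nat
  | 0, _ => none
  | fuel + 1, p =>
    if p < cs.length then
      if cs.getD p ' ' ≠ q then qspMatchLitB cs q fuel (p + 1)
      else if p + 1 < cs.length ∧ cs.getD (p + 1) ' ' = q then
        match qspMatchLitB cs q fuel (p + 2) with
        | some e => some e
        | none => some (p + 1)
      else some (p + 1)
    else none

-- attempt of the full alternation `'(?:[^']|'')*'|"(?:[^"]|"")*"` at one position
-- (a match can only start on a quote character; the two alternatives are disjoint)
def qspMatchAtB (cs : List Char) (i : Nat) : Option Nat :=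
  if cs.getD i ' ' = '\'' then qspMatchLitB cs '\'' cs.length (i + 1)
  else if cs.getD i ' ' = '"' then qspMatchLitB cs '"' cs.length (i + 1)
  else none

-- B's finditer loop: scan `i` for the next match start, `gs` is the end of the previous
-- match (start of the current gap); on a match, reject a gap holding a stray quote,
-- else emit the gap and the literal; at the end, check and emit the tail the same way.
def qspFinditB (cs : List Char) : Nat → Nat → Nat → List (Bool × String) →
    Option (List (Bool × String))
  | 0, _, _, _ => none
  | fuel + 1, i, gs, segs =>
    if i < cs.length then
      match qspMatchAtB cs i with
      | none => qspFinditB cs fuel (i + 1) gs segs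
      | some e =>
        let gap := (cs.drop gs).take (i - gs)
        if gap.any (fun c => c = '\'' || c = '"') then none
        else
          let segs1 := if gap ≠ [] then segs ++ [(false, String.ofList gap)] else segs
          qspFinditB cs fuel e e (segs1 ++ [(true, pvSlice cs i e)])
    else
      let tail := cs.drop gs
      if tail.any (fun c => c = '\'' || c = '"') then none
      else if tail ≠ [] then some (segs ++ [(false, String.ofList tail)]) else some segs

def split_qsp_expression_segments_py_alt (text : String) : Option (List (Bool × String)) :=
  qspFinditB text.toList (text.toList.length + 1) 0 0 []

-- ===== PRECONDITION & SPEC =====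
def Spec_split_qsp_expression_segments_py (text : String) (out : Option (List (Bool × String))) : Prop := out = split_qsp_expression_segments_py_alt text
instance (text : String) (out : Option (List (Bool × String))) : Decidable (Spec_split_qsp_expression_segments_py text out) := by unfold Spec_split_qsp_expression_segments_py; infer_instance

-- ===== CLAIM (what is proved, stated in full; the proofs are below) =====
def Claim_equal_split_qsp_expression_segments_py : Prop := ∀ (text : String), Dom_split_qsp_expression_segments_py text → Spec_split_qsp_expression_segments_py text (split_qsp_expression_segments_py text)

-- ===== LEMMAS AND PROOFS =====

lemma qspInnerA_nil {cs : List Char} {q : Char} {fa p : Nat} (h : cs.length ≤ p) :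
    qspInnerA cs q fa p = none := by
  cases fa with
  | zero => rfl
  | succ f => unfold qspInnerA; rw [if_neg (by omega)]

lemma qspMatchLitB_nil {cs : List Char} {q : Char} {fb p : Nat} (h : cs.length ≤ p) :
    qspMatchLitB cs q fb p = none := by
  cases fb with
  | zero => rfl
  | succ f => unfold qspMatchLitB; rw [if_neg (by omega)]

-- fuel irrelevance for A's inner loop
lemma qspInnerA_congr {cs : List Char} {q : Char} (fa fb p : Nat)
    (ha : cs.length - p ≤ fa) (hb : cs.length - p ≤ fb) :
    qspInnerA cs q fa p = qspInnerA cs q fb p := by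
  induction fa generalizing fb p with
  | zero => rw [qspInnerA_nil (by omega), qspInnerA_nil (by omega)]
  | succ fa ih =>
      rcases Nat.lt_or_ge p cs.length with hp | hp
      case inr => rw [qspInnerA_nil hp, qspInnerA_nil hp]
      case inl =>
        obtain ⟨f, rfl⟩ : ∃ f, fb = f + 1 := ⟨fb - 1, by omega⟩
        unfold qspInnerA
        rw [if_pos hp, if_pos hp]
        dsimp only
        by_cases hq : cs.getD p ' ' = q
        · simp only [if_pos hq]
          by_cases hd : p + 1 < cs.length ∧ cs.getD (p + 1) ' ' = q
          · simp only [if_pos hd]; exact ih f (p + 2) (by omega) (by omega)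
          · simp only [if_neg hd]
        · simp only [if_neg hq]; exact ih f (p + 1) (by omega) (by omega)

lemma qspInnerA_some_bounds {cs : List Char} {q : Char} {fa p r : Nat}
    (h : qspInnerA cs q fa p = some r) : p < r ∧ r ≤ cs.length := by
  induction fa generalizing p r with
  | zero => simp [qspInnerA] at h
  | succ f ih =>
      unfold qspInnerA at h
      by_cases hp : p < cs.length
      · rw [if_pos hp] at h
        dsimp only at h
        by_cases hq : cs.getD p ' ' = q
        · rw [if_pos hq] at h
          by_cases hd : p + 1 < cs.length ∧ cs.getD (p + 1) ' ' = q
          · rw [if_pos hd] at h; have := ih h; omega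
          · rw [if_neg hd] at h
            simp only [Option.some.injEq] at h; omega
        · rw [if_neg hq] at h; have := ih h; omega
      · rw [if_neg hp] at h; exact absurd h (by simp)

-- greedy success: when A's inner loop closes the literal at r, the regex star never
-- backtracks and the match ends at r too
lemma qspMatchLitB_of_innerA_some {cs : List Char} {q : Char} {fa fb p r : Nat}
    (hb : cs.length - p ≤ fb) (h : qspInnerA cs q fa p = some r) :
    qspMatchLitB cs q fb p = some r := by
  induction fa generalizing fb p with
  | zero => simp [qspInnerA] at h
  | succ f ih =>
      unfold qspInnerA at h
      by_cases hp : p < cs.length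
      case neg => rw [if_neg hp] at h; exact absurd h (by simp)
      rw [if_pos hp] at h
      dsimp only at h
      obtain ⟨fb', rfl⟩ : ∃ g, fb = g + 1 := ⟨fb - 1, by omega⟩
      unfold qspMatchLitB
      rw [if_pos hp]
      by_cases hq : cs.getD p ' ' = q
      · rw [if_pos hq] at h
        rw [if_neg (not_not_intro hq)]
        by_cases hd : p + 1 < cs.length ∧ cs.getD (p + 1) ' ' = q
        · rw [if_pos hd] at h
          rw [if_pos hd, ih (fb := fb') (by omega) h]
        · rw [if_neg hd] at h
          rw [if_neg hd]
          exact h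
      · rw [if_neg hq] at h
        simp only [if_pos hq]
        exact ih (by omega) h

-- unterminated literal: when A's inner loop runs off the end, the regex either fails too,
-- or backtracks and closes on the first quote of a doubled pair — leaving a quote at the
-- match end e with the scan from e+1 again running off the end
lemma qspMatchLitB_of_innerA_none {cs : List Char} {q : Char} {fa fb p : Nat}
    (ha : cs.length - p ≤ fa) (hb : cs.length - p ≤ fb)
    (h : qspInnerA cs q fa p = none) :
    qspMatchLitB cs q fb p = none ∨
      ∃ e, qspMatchLitB cs q fb p = some e ∧ p < e ∧ e < cs.length ∧
        cs.getD e ' ' = q ∧ qspInnerA cs q cs.length (e + 1) = none := by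
  induction fa generalizing fb p with
  | zero => exact Or.inl (qspMatchLitB_nil (by omega))
  | succ f ih =>
      rcases Nat.lt_or_ge p cs.length with hp | hp
      case inr => exact Or.inl (qspMatchLitB_nil hp)
      obtain ⟨fb', rfl⟩ : ∃ g, fb = g + 1 := ⟨fb - 1, by omega⟩
      unfold qspInnerA at h
      rw [if_pos hp] at h
      dsimp only at h
      unfold qspMatchLitB
      rw [if_pos hp]
      by_cases hq : cs.getD p ' ' = q
      · rw [if_pos hq] at h
        rw [if_neg (not_not_intro hq)]
        by_cases hd : p + 1 < cs.length ∧ cs.getD (p + 1) ' ' = q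
        · rw [if_pos hd] at h
          simp only [if_pos hd]
          rcases ih (p := p + 2) (fb := fb') (by omega) (by omega) h with hnone | ⟨e, he, hpe, hel, heq, hrest⟩
          · rw [hnone]
            refine Or.inr ⟨p + 1, rfl, by omega, hd.1, hd.2, ?_⟩
            rw [qspInnerA_congr cs.length f (p + 2) (by omega) (by omega)]
            exact h
          · rw [he]
            exact Or.inr ⟨e, rfl, by omega, hel, heq, hrest⟩
        · rw [if_neg hd] at h
          exact absurd h (by simp)
      · rw [if_neg hq] at h
        simp only [if_pos hq]
        rcases ih (fb := fb') (p := p + 1) (by omega) (by omega) h with hn | ⟨e, he, hpe, hel, heq, hrest⟩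
        · exact Or.inl hn
        · exact Or.inr ⟨e, he, by omega, hel, heq, hrest⟩

-- if the current gap already holds a quote character, B can only end in None:
-- every later match (and the tail) runs the stray-quote check over that gap
lemma qspFinditB_gapQuote {cs : List Char} {fuel i gs : Nat} {segs : List (Bool × String)}
    {j : Nat} (hgj : gs ≤ j) (hji : j < i) (hjn : j < cs.length)
    (hq : cs.getD j ' ' = '\'' ∨ cs.getD j ' ' = '"') :
    qspFinditB cs fuel i gs segs = none := by
  have hmem : ∀ k, (cs.drop gs).take k ≠ [] → j < gs + k →
      ((cs.drop gs).take k).any (fun c => c = '\'' || c = '"') = true := by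
    intro k _ hjk
    apply List.any_eq_true.mpr
    refine ⟨cs.getD j ' ', ?_, ?_⟩
    · apply List.mem_iff_getElem.mpr
      refine ⟨j - gs, ?_, ?_⟩
      · simpa [List.length_take, List.length_drop] using (by omega : j - gs < min k (cs.length - gs))
      · rw [List.getElem_take, List.getElem_drop]
        rw [List.getD_eq_getElem _ _ hjn]
        congr 1
        omega
    · rcases hq with h | h <;> simp [List.getD] at h <;> simp [h]
  induction fuel generalizing i segs with
  | zero => rfl
  | succ f ih =>
      unfold qspFinditB
      by_cases hil : i < cs.length
      · rw [if_pos hil]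
        rcases hm : qspMatchAtB cs i with _ | e
        · exact ih (by omega)
        · dsimp only
          rw [if_pos ?_]
          apply hmem
          · intro hnil
            have : ((cs.drop gs).take (i - gs)).length = 0 := by rw [hnil]; rfl
            rw [List.length_take, List.length_drop] at this
            omega
          · omega
      · rw [if_neg hil]
        dsimp only
        rw [if_pos ?_]
        apply List.any_eq_true.mpr
        refine ⟨cs.getD j ' ', ?_, by rcases hq with h | h <;> simp [List.getD] at h <;> simp [h]⟩
        apply List.mem_iff_getElem.mpr
        refine ⟨j - gs, by simpa [List.length_drop] using (by omega : j - gs < cs.length - gs), ?_⟩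
        rw [List.getElem_drop, List.getD_eq_getElem _ _ hjn]
        congr 1
        omega

-- when A's inner loop says "unterminated" at a quote at i, B's finditer from i
-- necessarily returns None (each backtracked match re-creates the situation further
-- right; a failed attempt strands the quote in the gap)
lemma qspFinditB_of_innerA_none {cs : List Char} {q : Char} {fuel i gs : Nat}
    {segs : List (Bool × String)}
    (hfuel : cs.length - i + 1 ≤ fuel) (hgi : gs ≤ i) (hil : i < cs.length)
    (hiq : cs.getD i ' ' = q) (hq : q = '\'' ∨ q = '"')
    (hnone : qspInnerA cs q cs.length (i + 1) = none) :
    qspFinditB cs fuel i gs segs = none := by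
  induction fuel generalizing i gs segs with
  | zero => rfl
  | succ f ih =>
      unfold qspFinditB
      rw [if_pos hil]
      have hmatch : qspMatchAtB cs i = qspMatchLitB cs q cs.length (i + 1) := by
        unfold qspMatchAtB
        rcases hq with h | h
        · rw [if_pos (h ▸ hiq), h]
        · rw [if_neg (by rw [hiq, h]; decide), if_pos (h ▸ hiq), h]
      rcases qspMatchLitB_of_innerA_none (fa := cs.length) (fb := cs.length) (p := i + 1) (by omega) (by omega) hnone with
        hm | ⟨e, hm, hpe, hel, heq, hrest⟩
      · rw [hmatch, hm]
        exact qspFinditB_gapQuote hgi (by omega) hil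
          (hq.imp (fun h => hiq.trans h) (fun h => hiq.trans h))
      · rw [hmatch, hm]
        dsimp only
        split_ifs with hgap hnil
        · rfl
        · exact ih (by omega) le_rfl hel heq hrest
        · exact ih (by omega) le_rfl hel heq hrest

-- a quote-free region contains no quote character (for B's stray-quote checks)
lemma qspGapAnyFalse {cs : List Char} {gs m : Nat}
    (h : ∀ j, gs ≤ j → j < m → cs.getD j ' ' ≠ '\'' ∧ cs.getD j ' ' ≠ '"') :
    ((cs.drop gs).take (m - gs)).any (fun c => c = '\'' || c = '"') = false := by
  apply List.any_eq_false.mpr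
  intro x hx
  obtain ⟨k, hk, hxk⟩ := List.mem_iff_getElem.mp hx
  have hklen : k < min (m - gs) (cs.length - gs) := by
    simpa [List.length_take, List.length_drop] using hk
  have hcs : x = cs[gs + k]'(by omega) := by
    rw [← hxk, List.getElem_take, List.getElem_drop]
  have hj := h (gs + k) (by omega) (by omega)
  rw [List.getD_eq_getElem _ _ (by omega)] at hj
  rw [← hcs] at hj
  simp [hj.1, hj.2]

-- the main correspondence: A's outer state machine equals B's finditer loop, given a
-- quote-free pending gap [gs, i) and enough fuel on both sides
lemma qspOuterAB {cs : List Char} (fa fb : Nat) (segs : List (Bool × String)) (gs i : Nat)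
    (hfa : cs.length - i + 1 ≤ fa) (hfb : cs.length - i + 1 ≤ fb) (hgi : gs ≤ i)
    (hgap : ∀ j, gs ≤ j → j < i → cs.getD j ' ' ≠ '\'' ∧ cs.getD j ' ' ≠ '"') :
    qspOuterA cs fa segs gs i = qspFinditB cs fb i gs segs := by
  induction fa generalizing fb segs gs i with
  | zero => omega
  | succ fa ih =>
      obtain ⟨f, rfl⟩ : ∃ f, fb = f + 1 := ⟨fb - 1, by omega⟩
      by_cases hil : i < cs.length
      · by_cases hq : cs.getD i ' ' ≠ '\'' ∧ cs.getD i ' ' ≠ '"'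
        · -- not a quote: both loops just advance the scan index
          have hm : qspMatchAtB cs i = none := by
            unfold qspMatchAtB; rw [if_neg hq.1, if_neg hq.2]
          unfold qspOuterA qspFinditB
          rw [if_pos hil, if_pos hil, hm]
          simp only [if_pos hq]
          exact ih f segs gs (i + 1) (by omega) (by omega) (by omega)
            (fun j hj hji => by
              rcases Nat.lt_or_ge j i with h | h
              · exact hgap j hj h
              · have : j = i := by omega
                subst this; exact hq)
        · -- a quote at i
          have hq' : cs.getD i ' ' = '\'' ∨ cs.getD i ' ' = '"' := by
            by_cases h1 : cs.getD i ' ' = '\''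
            · exact Or.inl h1
            · by_cases h2 : cs.getD i ' ' = '"'
              · exact Or.inr h2
              · exact absurd ⟨h1, h2⟩ hq
          have hmatch : qspMatchAtB cs i = qspMatchLitB cs (cs.getD i ' ') cs.length (i + 1) := by
            unfold qspMatchAtB
            rcases hq' with h | h
            · rw [if_pos h, h]
            · rw [if_neg (by rw [h]; decide), if_pos h, h]
          rcases hr : qspInnerA cs (cs.getD i ' ') cs.length (i + 1) with _ | r
          · -- unterminated literal: A returns None, and so does B's finditer
            unfold qspOuterA
            rw [if_pos hil]
            simp only [if_neg hq, hr]
            exact (qspFinditB_of_innerA_none (by omega) hgi hil rfl hq' hr).symm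
          · -- closed literal: no backtracking, both emit the gap and the literal
            have hlit : qspMatchLitB cs (cs.getD i ' ') cs.length (i + 1) = some r :=
              qspMatchLitB_of_innerA_some (by omega) hr
            have hrb := qspInnerA_some_bounds hr
            have hany : ((cs.drop gs).take (i - gs)).any (fun c => c = '\'' || c = '"') = false :=
              qspGapAnyFalse hgap
            have hnil : ((cs.drop gs).take (i - gs) ≠ []) ↔ gs < i := by
              rw [← List.length_pos_iff_ne_nil, List.length_take, List.length_drop]
              omega
            unfold qspOuterA qspFinditB
            rw [if_pos hil, if_pos hil, hmatch, hlit]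
            simp only [if_neg hq, hr, hany, Bool.false_eq_true, if_false]
            have hsegs1 : (if ((cs.drop gs).take (i - gs)) ≠ [] then
                  segs ++ [(false, String.ofList ((cs.drop gs).take (i - gs)))] else segs)
                = (if gs < i then segs ++ [(false, pvSlice cs gs i)] else segs) := by
              by_cases hgsi : gs < i
              · rw [if_pos (hnil.mpr hgsi), if_pos hgsi]; rfl
              · rw [if_neg (fun h => hgsi (hnil.mp h)), if_neg hgsi]
            rw [hsegs1]
            exact ih f _ r r (by omega) (by omega) le_rfl
              (fun j hj hji => absurd hji (by omega))
      · -- end of the text: A emits the pending gap, B the (identical) tail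
        have htail : cs.drop gs = (cs.drop gs).take (cs.length - gs) := by
          rw [← List.length_drop]
          exact (List.take_length).symm
        have hany : ((cs.drop gs).take (cs.length - gs)).any (fun c => c = '\'' || c = '"') = false :=
          qspGapAnyFalse (fun j hj hji => hgap j hj (by omega))
        have hnil : (cs.drop gs ≠ []) ↔ gs < cs.length := by
          rw [← List.length_pos_iff_ne_nil, List.length_drop]
          omega
        unfold qspOuterA qspFinditB
        rw [if_neg hil, if_neg hil]
        dsimp only
        rw [htail, hany]
        simp only [Bool.false_eq_true, if_false]
        rw [← htail]
        by_cases hgsn : gs < cs.length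
        · rw [if_pos (hnil.mpr hgsn), if_pos hgsn]
          have : String.ofList (cs.drop gs) = pvSlice cs gs cs.length := by
            unfold pvSlice; rw [← htail]
          rw [this]
        · rw [if_neg (fun h => hgsn (hnil.mp h)), if_neg hgsn]

-- ===== VERDICT (by name: the statement is the Claim_ definition above) =====
theorem split_qsp_expression_segments_py_spec : Claim_equal_split_qsp_expression_segments_py := by
  intro text _
  unfold Spec_split_qsp_expression_segments_py split_qsp_expression_segments_py
    split_qsp_expression_segments_py_alt
  by_cases h : text.toList = []
  · rw [if_pos h, h]
    rfl
  · rw [if_neg h]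
    exact qspOuterAB _ _ [] 0 0 (by omega) (by omega) le_rfl
      (fun j _ hj => absurd hj (by omega))
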